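-- pv_equiv track=rewrite | github.com/liam5322/Smite-Assault-Advisor | smite_items_scraper.py | _calculate_assault_priority
-- ===== SOURCE A (Python) =====
-- from typing import List, Dict, Optional
--
-- def _calculate_assault_priority(name: str, stats: Dict, passive: str) -> int:
--     """Calculate item priority for Assault mode (1-10)"""
--     priority = 5  # Base priority
--
--     name_lower = name.lower()
--     passive_lower = passive.lower()
--
--     # High priority items for Assault
--     if any(word in name_lower for word in ['divine ruin', 'toxic blade', 'brawlers']):
--         priority = 9  # Anti-heal is crucial
--     elif any(word in name_lower for word in ['meditation', 'salvation']):
--         priority = 8  # Sustain is important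
--     elif any(word in name_lower for word in ['mystical mail', 'spectral']):
--         priority = 7  # Counter items
--     elif 'health' in stats and stats['health'] > 200:
--         priority = 7  # Tanky items good in Assault
--     elif any(word in passive_lower for word in ['heal', 'regeneration']):
--         priority = 6  # Sustain passives
--     elif any(word in name_lower for word in ['penetration', 'obsidian', 'titans']):
--         priority = 6  # Penetration important
--
--     return min(10, max(1, priority))
-- ===== SOURCE B (Python) =====
-- _NAME_RULES = [
--     (9, ('divine ruin', 'toxic blade', 'brawlers')),
--     (8, ('meditation', 'salvation')),
--     (7, ('mystical mail', 'spectral')),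
--     (6, ('penetration', 'obsidian', 'titans')),
-- ]
--
--
-- def _calculate_assault_priority(name: str, stats: dict, passive: str) -> int:
--     """Calculate item priority for Assault mode (1-10)."""
--     name_lower = name.lower()
--     passive_lower = passive.lower()
--     best = 5
--     for score, words in _NAME_RULES:
--         if any(w in name_lower for w in words):
--             best = max(best, score)
--     if stats.get('health', 0) > 200:
--         best = max(best, 7)
--     if any(w in passive_lower for w in ('heal', 'regeneration')):
--         best = max(best, 6)
--     return best
-- ===== Notes on version B (the rewrite author's own statement) =====
-- stated objective: simpler
-- what changed: Replaces the first-match elif cascade (plus a redundant min/max clamp) by a max-of-all-matching-rules fold over a rule table: because the cascade's scores are non-increasing (9,8,7,7,6,6), the first matching rule's score equals the maximum over all matching rules, and the result always lies in [5,9] so the clamp is dropped.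
import Mathlib
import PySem

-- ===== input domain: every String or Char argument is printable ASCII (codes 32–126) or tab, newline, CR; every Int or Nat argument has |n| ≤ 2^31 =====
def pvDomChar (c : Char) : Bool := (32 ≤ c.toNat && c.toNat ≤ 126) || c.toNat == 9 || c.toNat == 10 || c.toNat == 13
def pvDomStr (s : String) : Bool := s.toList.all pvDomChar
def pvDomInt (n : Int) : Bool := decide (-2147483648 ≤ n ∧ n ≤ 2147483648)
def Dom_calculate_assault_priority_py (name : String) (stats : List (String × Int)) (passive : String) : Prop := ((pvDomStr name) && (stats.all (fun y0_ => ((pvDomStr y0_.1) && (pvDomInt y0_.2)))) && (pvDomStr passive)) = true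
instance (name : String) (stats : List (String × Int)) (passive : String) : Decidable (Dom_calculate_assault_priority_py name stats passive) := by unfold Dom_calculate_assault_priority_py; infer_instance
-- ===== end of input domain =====

-- ===== PORT A =====
-- B replaces the elif cascade with a max-over-matching-rules fold (same cost; one honest line).
def calculate_assault_priority_py (name : String) (stats : List (String × Int)) (passive : String) : Int :=
  let priority : Int := 5
  let name_lower := PySem.Str.lower name
  let passive_lower := PySem.Str.lower passive
  let priority :=
    if ["divine ruin", "toxic blade", "brawlers"].any (fun w => PySem.Str.isIn w name_lower) then (9 : Int)
    else if ["meditation", "salvation"].any (fun w => PySem.Str.isIn w name_lower) then 8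
    else if ["mystical mail", "spectral"].any (fun w => PySem.Str.isIn w name_lower) then 7
    -- 'health' in stats and stats['health'] > 200  (the membership guard makes the lookup total)
    else if ((match (PySem.Dict.mk stats).get? "health" with
              | some v => decide (v > 200)
              | none => false) = true) then 7
    else if ["heal", "regeneration"].any (fun w => PySem.Str.isIn w passive_lower) then 6
    else if ["penetration", "obsidian", "titans"].any (fun w => PySem.Str.isIn w name_lower) then 6
    else priority
  min 10 (max 1 priority)

-- ===== PORT B =====
def pvNameRules : List (Int × List String) :=
  [(9, ["divine ruin", "toxic blade", "brawlers"]),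
   (8, ["meditation", "salvation"]),
   (7, ["mystical mail", "spectral"]),
   (6, ["penetration", "obsidian", "titans"])]

def calculate_assault_priority_py_alt (name : String) (stats : List (String × Int)) (passive : String) : Int :=
  let name_lower := PySem.Str.lower name
  let passive_lower := PySem.Str.lower passive
  let best := pvNameRules.foldl
    (fun best r => if r.2.any (fun w => PySem.Str.isIn w name_lower) then max best r.1 else best)
    (5 : Int)
  let best := if (PySem.Dict.mk stats).getD "health" (0 : Int) > 200 then max best 7 else best
  let best := if ["heal", "regeneration"].any (fun w => PySem.Str.isIn w passive_lower) then max best 6 else best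
  best
-- ===== PRECONDITION & SPEC =====
def Spec_calculate_assault_priority_py (name : String) (stats : List (String × Int)) (passive : String) (out : Int) : Prop := out = calculate_assault_priority_py_alt name stats passive
instance (name : String) (stats : List (String × Int)) (passive : String) (out : Int) : Decidable (Spec_calculate_assault_priority_py name stats passive out) := by unfold Spec_calculate_assault_priority_py; infer_instance

-- ===== CLAIM (what is proved, stated in full; the proofs are below) =====
def Claim_equal_calculate_assault_priority_py : Prop := ∀ (name : String) (stats : List (String × Int)) (passive : String), Dom_calculate_assault_priority_py name stats passive → Spec_calculate_assault_priority_py name stats passive (calculate_assault_priority_py name stats passive)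

-- ===== LEMMAS AND PROOFS =====

-- ===== VERDICT (by name: the statement is the Claim_ definition above) =====
theorem calculate_assault_priority_py_spec : Claim_equal_calculate_assault_priority_py := by
  intro name stats passive _
  unfold Spec_calculate_assault_priority_py
  unfold calculate_assault_priority_py calculate_assault_priority_py_alt pvNameRules
  simp only [List.foldl]
  cases hh : (PySem.Dict.mk stats).get? "health" with
  | none =>
      cases h1 : ["divine ruin", "toxic blade", "brawlers"].any (fun w => PySem.Str.isIn w (PySem.Str.lower name)) <;>
      cases h2 : ["meditation", "salvation"].any (fun w => PySem.Str.isIn w (PySem.Str.lower name)) <;>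
      cases h3 : ["mystical mail", "spectral"].any (fun w => PySem.Str.isIn w (PySem.Str.lower name)) <;>
      cases h4 : ["heal", "regeneration"].any (fun w => PySem.Str.isIn w (PySem.Str.lower passive)) <;>
      cases h5 : ["penetration", "obsidian", "titans"].any (fun w => PySem.Str.isIn w (PySem.Str.lower name)) <;>
      simp [h1, h2, h3, h4, h5, hh, PySem.Dict.getD_eq_get?_getD]
  | some v =>
      cases h1 : ["divine ruin", "toxic blade", "brawlers"].any (fun w => PySem.Str.isIn w (PySem.Str.lower name)) <;>
      cases h2 : ["meditation", "salvation"].any (fun w => PySem.Str.isIn w (PySem.Str.lower name)) <;>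
      cases h3 : ["mystical mail", "spectral"].any (fun w => PySem.Str.isIn w (PySem.Str.lower name)) <;>
      cases h4 : ["heal", "regeneration"].any (fun w => PySem.Str.isIn w (PySem.Str.lower passive)) <;>
      cases h5 : ["penetration", "obsidian", "titans"].any (fun w => PySem.Str.isIn w (PySem.Str.lower name)) <;>
      rcases lt_or_ge (200 : Int) v with hv | hv <;>
      simp [h1, h2, h3, h4, h5, hh, hv, PySem.Dict.getD_eq_get?_getD] <;> omega
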